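-- pv_equiv track=rewrite | github.com/Feonorka/GB_py | teh_spec/sem3/exp_3.py | find_shared_items
-- ===== SOURCE A (Python) =====
-- def find_shared_items(friends):
--     # Находим вещи, которые есть у всех друзей
--     common_items = set.intersection(*friends.values())
--
--     # Находим вещи, которые есть только у одного друга
--     unique_items = set.union(*friends.values()) - common_items
--
--     # Находим вещи, которые есть у всех друзей кроме одного
--     other_items = {}
--     for friend, items in friends.items():
--         other_friends_items = set.union(*(friends[f] for f in friends if f != friend))
--         other_items[friend] = other_friends_items - items
--
--     return common_items, unique_items, other_items
-- ===== SOURCE B (Python) =====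
-- def find_shared_items(friends):
--     values = list(friends.values())
--     # One pass: the union of everybody's items, computed once.
--     total = set()
--     for s in values:
--         total |= s
--     # Intersection folded pairwise over the value sets.
--     common_items = set(values[0])
--     for s in values[1:]:
--         common_items &= s
--     unique_items = total - common_items
--     # union(everyone but f) - items(f) == total - items(f), so no inner union pass.
--     other_items = {friend: total - items for friend, items in friends.items()}
--     return common_items, unique_items, other_items
-- ===== Notes on version B (the rewrite author's own statement) =====
-- stated objective: alternative
-- what changed: B computes the union of all item sets once and derives each friend's 'all-but-one' set as total_union - items, instead of A re-computing the union of the n-1 other sets inside the loop for every friend; measured ~1.3x at the largest size, not confirmed as faster.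
import Mathlib
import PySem

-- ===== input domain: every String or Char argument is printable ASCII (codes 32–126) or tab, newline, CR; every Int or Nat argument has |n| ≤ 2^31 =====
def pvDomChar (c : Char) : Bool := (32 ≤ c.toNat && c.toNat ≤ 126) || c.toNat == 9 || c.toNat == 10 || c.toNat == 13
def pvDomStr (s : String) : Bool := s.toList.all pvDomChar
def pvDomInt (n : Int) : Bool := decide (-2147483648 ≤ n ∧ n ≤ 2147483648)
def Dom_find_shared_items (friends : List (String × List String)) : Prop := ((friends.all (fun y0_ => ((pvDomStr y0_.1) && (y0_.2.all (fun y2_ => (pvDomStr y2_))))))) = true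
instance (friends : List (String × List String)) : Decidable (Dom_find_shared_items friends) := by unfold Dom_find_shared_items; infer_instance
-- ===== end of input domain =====

-- B computes the total union once and gets each friend's all-but-one set as total - items
-- (A re-unions the n-1 other sets per friend); proved equal on dicts with ≥ 2 distinct keys.


-- ===== PORT A =====
-- 'common_items = set.intersection(*friends.values())', 'set.union(*friends.values()) - common_items',
-- then per friend 'set.union(*(friends[f] for f in friends if f != friend)) - items'.
-- The '| [] =>' arms are the inputs where Python raises TypeError (empty starred call); excluded by Pre_.
def find_shared_items (friends : List (String × List String)) : List String × List String × (List (String × List String)) :=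
  match friends.map (fun p => PySem.Set.ofList p.2) with
  | [] => ([], [], [])
  | v0 :: rest =>
    let common := rest.foldl PySem.Set.inter v0
    let unique := PySem.Set.diff (rest.foldl PySem.Set.union v0) common
    let other := friends.map (fun p =>
      match (friends.filter (fun q => !(q.1 == p.1))).map (fun q => PySem.Set.ofList q.2) with
      | [] => (p.1, ([] : List String))
      | o0 :: os => (p.1, PySem.Set.diff (os.foldl PySem.Set.union o0) (PySem.Set.ofList p.2)))
    (common, unique, other)

-- ===== PORT B =====
-- total = set(); for s in values: total |= s; common folded from set(values[0]);
-- other_items[friend] = total - items (no inner union pass).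
def find_shared_items_alt (friends : List (String × List String)) : List String × List String × (List (String × List String)) :=
  let vals := friends.map (fun p => PySem.Set.ofList p.2)
  let total := vals.foldl PySem.Set.union PySem.Set.empty
  match vals with
  | [] => ([], [], [])   -- Python B: IndexError on values[0]; excluded by Pre_
  | v0 :: rest =>
    let common := rest.foldl PySem.Set.inter (PySem.Set.ofList v0)
    (common, PySem.Set.diff total common,
     friends.map (fun p => (p.1, PySem.Set.diff total (PySem.Set.ofList p.2))))

-- ===== PRECONDITION & SPEC =====
-- Pre_ excludes (a) dicts with fewer than 2 keys, where A raises TypeError, and (b) association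
-- lists with duplicate keys, which do not faithfully represent a Python dict (dict construction
-- overwrites earlier duplicate values, so the ports' reading of such lists is accidental).
def Pre_find_shared_items (friends : List (String × List String)) : Prop :=
  2 ≤ friends.length ∧ (friends.map Prod.fst).Nodup
instance (friends : List (String × List String)) : Decidable (Pre_find_shared_items friends) := by unfold Pre_find_shared_items; infer_instance

def pvWitness_find_shared_items : (List (String × List String)) :=
  [("alice", ["pen", "book"]), ("bob", ["book"])]

def Spec_find_shared_items (friends : List (String × List String)) (out : List String × List String × (List (String × List String))) : Prop := out = find_shared_items_alt friends
instance (friends : List (String × List String)) (out : List String × List String × (List (String × List String))) : Decidable (Spec_find_shared_items friends out) := by unfold Spec_find_shared_items; infer_instance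

-- ===== CLAIM (what is proved, stated in full; the proofs are below) =====
def Claim_equal_find_shared_items : Prop := ∀ (friends : List (String × List String)), Dom_find_shared_items friends → Pre_find_shared_items friends → Spec_find_shared_items friends (find_shared_items friends)
-- ===== LEMMAS AND PROOFS =====

-- diff (foldl union) is insensitive to replacing the accumulator by one that agrees outside s.
theorem pv_diff_foldl_union_congr (post : List (List String)) (s : List String) :
    ∀ (a b : List String),
      PySem.Set.diff a s = PySem.Set.diff b s →
      (∀ x, x ∈ b → x ∈ a) → (∀ x, x ∈ a → x ∈ b ∨ x ∈ s) →
      PySem.Set.diff (post.foldl PySem.Set.union a) s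
        = PySem.Set.diff (post.foldl PySem.Set.union b) s := by
  induction post with
  | nil => intro a b h1 _ _; simpa using h1
  | cons w post ih =>
    intro a b h1 h2 h3
    simp only [List.foldl_cons]
    refine ih (PySem.Set.union a w) (PySem.Set.union b w) ?_ ?_ ?_
    · show (PySem.Set.update a w).filter _ = (PySem.Set.update b w).filter _
      rw [PySem.Set.update_eq_append_filter, PySem.Set.update_eq_append_filter,
          List.filter_append, List.filter_append]
      have h1' : a.filter (fun x => !(PySem.Set.contains s x)) = b.filter (fun x => !(PySem.Set.contains s x)) := h1
      rw [h1']
      congr 1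
      rw [List.filter_filter, List.filter_filter]
      apply List.filter_congr
      intro x _
      by_cases hs : x ∈ s
      · simp [hs]
      · have hab : x ∈ a ↔ x ∈ b := ⟨fun hx => (h3 x hx).resolve_right hs, h2 x⟩
        simp [hs, hab]
    · intro x hx
      rcases (PySem.Set.mem_union _ _ _).1 hx with h | h
      · exact (PySem.Set.mem_union _ _ _).2 (Or.inl (h2 x h))
      · exact (PySem.Set.mem_union _ _ _).2 (Or.inr h)
    · intro x hx
      rcases (PySem.Set.mem_union _ _ _).1 hx with h | h
      · rcases h3 x h with h' | h'
        · exact Or.inl ((PySem.Set.mem_union _ _ _).2 (Or.inl h'))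
        · exact Or.inr h'
      · exact Or.inl ((PySem.Set.mem_union _ _ _).2 (Or.inr h))

-- Dropping one set v ⊆ s from the chain of unions does not change diff · s.
theorem pv_diff_foldl_union_skip (pre post : List (List String)) (v s acc : List String)
    (hv : ∀ x ∈ v, x ∈ s) :
    PySem.Set.diff ((pre ++ v :: post).foldl PySem.Set.union acc) s
      = PySem.Set.diff ((pre ++ post).foldl PySem.Set.union acc) s := by
  rw [List.foldl_append, List.foldl_append, List.foldl_cons]
  set b := pre.foldl PySem.Set.union acc with hb
  refine pv_diff_foldl_union_congr post s (PySem.Set.union b v) b ?_ ?_ ?_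
  · show (PySem.Set.update b v).filter _ = _
    rw [PySem.Set.update_eq_append_filter, List.filter_append]
    have hnil : ((PySem.Set.ofList v).filter (fun y => !(PySem.Set.contains b y))).filter
        (fun x => !(PySem.Set.contains s x)) = [] := by
      rw [List.filter_eq_nil_iff]
      intro x hx
      have hxv : x ∈ v := (PySem.Set.mem_ofList _ _).1 (List.mem_of_mem_filter hx)
      simp [hv x hxv]
    rw [hnil, List.append_nil]
    rfl
  · intro x hx; exact (PySem.Set.mem_union _ _ _).2 (Or.inl hx)
  · intro x hx
    rcases (PySem.Set.mem_union _ _ _).1 hx with h | h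
    · exact Or.inl h
    · exact Or.inr (hv x h)

theorem pv_union_empty (l : List String) :
    PySem.Set.union PySem.Set.empty (PySem.Set.ofList l) = PySem.Set.ofList l := by
  show PySem.Set.update [] (PySem.Set.ofList l) = _
  rw [PySem.Set.update_nil_left, PySem.Set.ofList_ofList]

theorem pv_filter_ne_of_nodup (pre post : List (String × List String)) (p : String × List String)
    (hnd : ((pre ++ p :: post).map Prod.fst).Nodup) :
    (pre ++ p :: post).filter (fun q => !(q.1 == p.1)) = pre ++ post := by
  rw [List.map_append, List.map_cons, List.nodup_append] at hnd
  obtain ⟨h1, h2, h3⟩ := hnd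
  rw [List.nodup_cons] at h2
  have hpre : pre.filter (fun q => !(q.1 == p.1)) = pre := List.filter_eq_self.mpr (by
    intro q hq
    have hne : q.1 ≠ p.1 := h3 _ (List.mem_map_of_mem hq) _ List.mem_cons_self
    simpa using hne)
  have hpost : post.filter (fun q => !(q.1 == p.1)) = post := List.filter_eq_self.mpr (by
    intro q hq
    have hne : q.1 ≠ p.1 := fun h => h2.1 (by rw [← h]; exact List.mem_map_of_mem hq)
    simpa using hne)
  rw [List.filter_append, List.filter_cons_of_neg (by simp), hpre, hpost]

-- The per-friend entry of A equals B's 'total - items' entry.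
theorem pv_entry_eq (pre post : List (String × List String)) (p : String × List String)
    (hnd : ((pre ++ p :: post).map Prod.fst).Nodup) (hne : pre ++ post ≠ []) :
    (match ((pre ++ p :: post).filter (fun q => !(q.1 == p.1))).map (fun q => PySem.Set.ofList q.2) with
      | [] => (p.1, ([] : List String))
      | o0 :: os => (p.1, PySem.Set.diff (os.foldl PySem.Set.union o0) (PySem.Set.ofList p.2)))
    = (p.1, PySem.Set.diff (((pre ++ p :: post).map (fun q => PySem.Set.ofList q.2)).foldl
        PySem.Set.union PySem.Set.empty) (PySem.Set.ofList p.2)) := by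
  rw [pv_filter_ne_of_nodup pre post p hnd]
  rcases hq : (pre ++ post).map (fun q => PySem.Set.ofList q.2) with _ | ⟨o0, os⟩
  · exact absurd (List.map_eq_nil_iff.mp hq) hne
  · rw [hq]
    show (p.1, PySem.Set.diff (os.foldl PySem.Set.union o0) (PySem.Set.ofList p.2)) = _
    congr 1
    have ho0m : o0 ∈ (pre ++ post).map (fun q => PySem.Set.ofList q.2) := by
      rw [hq]; exact List.mem_cons_self
    obtain ⟨q, -, hq0⟩ := List.mem_map.mp ho0m
    have hfold : os.foldl PySem.Set.union o0
        = ((pre ++ post).map (fun q => PySem.Set.ofList q.2)).foldl PySem.Set.union PySem.Set.empty := by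
      rw [hq, List.foldl_cons, ← hq0, pv_union_empty]
    rw [hfold, List.map_append, List.map_append, List.map_cons,
        pv_diff_foldl_union_skip (pre.map (fun q => PySem.Set.ofList q.2))
          (post.map (fun q => PySem.Set.ofList q.2)) (PySem.Set.ofList p.2) (PySem.Set.ofList p.2)
          PySem.Set.empty (fun x hx => hx)]

theorem find_shared_items_spec' (friends : List (String × List String))
    (hpre : Pre_find_shared_items friends) :
    find_shared_items friends = find_shared_items_alt friends := by
  obtain ⟨hlen, hnd⟩ := hpre
  rcases friends with _ | ⟨p0, tl⟩
  · simp at hlen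
  have hA : find_shared_items (p0 :: tl) = (
      (tl.map (fun p => PySem.Set.ofList p.2)).foldl PySem.Set.inter (PySem.Set.ofList p0.2),
      PySem.Set.diff ((tl.map (fun p => PySem.Set.ofList p.2)).foldl PySem.Set.union (PySem.Set.ofList p0.2))
        ((tl.map (fun p => PySem.Set.ofList p.2)).foldl PySem.Set.inter (PySem.Set.ofList p0.2)),
      (p0 :: tl).map (fun p =>
        match ((p0 :: tl).filter (fun q => !(q.1 == p.1))).map (fun q => PySem.Set.ofList q.2) with
        | [] => (p.1, ([] : List String))
        | o0 :: os => (p.1, PySem.Set.diff (os.foldl PySem.Set.union o0) (PySem.Set.ofList p.2)))) := rfl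
  have hB : find_shared_items_alt (p0 :: tl) = (
      (tl.map (fun p => PySem.Set.ofList p.2)).foldl PySem.Set.inter (PySem.Set.ofList (PySem.Set.ofList p0.2)),
      PySem.Set.diff (((p0 :: tl).map (fun p => PySem.Set.ofList p.2)).foldl PySem.Set.union PySem.Set.empty)
        ((tl.map (fun p => PySem.Set.ofList p.2)).foldl PySem.Set.inter (PySem.Set.ofList (PySem.Set.ofList p0.2))),
      (p0 :: tl).map (fun p => (p.1,
        PySem.Set.diff (((p0 :: tl).map (fun p => PySem.Set.ofList p.2)).foldl PySem.Set.union PySem.Set.empty)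
          (PySem.Set.ofList p.2)))) := rfl
  have hofof : PySem.Set.ofList (PySem.Set.ofList p0.2) = PySem.Set.ofList p0.2 :=
    PySem.Set.ofList_ofList _
  have htotal : (tl.map (fun p => PySem.Set.ofList p.2)).foldl PySem.Set.union (PySem.Set.ofList p0.2)
      = ((p0 :: tl).map (fun p => PySem.Set.ofList p.2)).foldl PySem.Set.union PySem.Set.empty := by
    rw [List.map_cons, List.foldl_cons, pv_union_empty]
  rw [hA, hB, hofof, htotal]
  simp only [Prod.mk.injEq]
  refine ⟨trivial, trivial, ?_⟩
  apply List.map_congr_left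
  intro p hp
  rcases List.append_of_mem hp with ⟨pre, post, hsplit⟩
  have hne : pre ++ post ≠ [] := by
    intro h
    have hlen1 : (p0 :: tl).length = 1 := by
      rw [hsplit, List.length_append, List.length_cons]
      have := List.length_eq_zero_iff.mpr h
      rw [List.length_append] at this; omega
    omega
  rw [hsplit] at hnd ⊢
  exact pv_entry_eq pre post p hnd hne

-- ===== VERDICT (by name: the statement is the Claim_ definition above) =====
theorem find_shared_items_spec : Claim_equal_find_shared_items := by
  intro friends _ hpre
  exact find_shared_items_spec' friends hpre
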